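-- pv_equiv track=rewrite | github.com/Keyfda/dsa4sLab1 | side_funcs.py | classify_suffixes
-- ===== SOURCE A (Python) =====
-- def classify_suffixes(s):
--     n = len(s)
--     suffix_types = [''] * n
--     suffix_types[-1] = 'S'
--
--     for i in range(n - 2, -1, -1):
--         if s[i] > s[i + 1]:
--             suffix_types[i] = 'L'
--         elif s[i] < s[i + 1]:
--             suffix_types[i] = 'S'
--         else:
--             suffix_types[i] = suffix_types[i + 1]
--
--     return ''.join(suffix_types)
-- ===== SOURCE B (Python) =====
-- def classify_suffixes(s):
--     n = len(s)
--     types = [''] * n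
--     types[-1] = 'S'
--     i = 0
--     while i < n:
--         j = i
--         while j + 1 < n and s[j + 1] == s[i]:
--             j += 1
--         t = 'S' if j == n - 1 or s[i] < s[j + 1] else 'L'
--         for k in range(i, j + 1):
--             types[k] = t
--         i = j + 1
--     return ''.join(types)
-- ===== Notes on version B (the rewrite author's own statement) =====
-- stated objective: alternative
-- what changed: Replaces the backward per-character pass that inherits the type from the right neighbour with a forward pass that finds each maximal run of equal characters and assigns the whole run one type from the character after the run.
import Mathlib
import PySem

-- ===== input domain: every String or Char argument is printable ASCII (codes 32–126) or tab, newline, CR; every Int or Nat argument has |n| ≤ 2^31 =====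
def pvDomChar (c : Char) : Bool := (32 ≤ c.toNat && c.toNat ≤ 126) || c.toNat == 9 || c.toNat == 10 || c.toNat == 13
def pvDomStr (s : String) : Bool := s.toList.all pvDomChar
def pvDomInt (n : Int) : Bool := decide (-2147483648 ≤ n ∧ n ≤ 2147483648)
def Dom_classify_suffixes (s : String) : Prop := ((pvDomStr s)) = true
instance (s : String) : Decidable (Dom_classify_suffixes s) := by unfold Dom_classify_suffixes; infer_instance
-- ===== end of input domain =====

-- B replaces A's backward per-character pass (inheriting the type from the right
-- neighbour) by a forward pass over maximal runs of equal characters; same O(n) cost.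
-- Equivalence of RETURN values only; both Pythons raise IndexError on "" (excluded by Pre_).

-- ===== PORT A =====
-- A's backward loop: types[i] is decided from s[i] vs s[i+1], inheriting types[i+1]
-- on equality; ported as the right-to-left structural recursion over the character
-- list (same reads, same branch order; `headD 'S'` only totalises reading types[i+1],
-- which is always present).
def pvClassA : List Char → List Char
  | [] => []
  | [_] => ['S']
  | a :: b :: rest =>
    let t := pvClassA (b :: rest)
    (if b < a then 'L' else if a < b then 'S' else t.headD 'S') :: t

def classify_suffixes (s : String) : String := String.mk (pvClassA s.toList)

-- ===== PORT B =====
-- B's forward run-grouping loop: the inner `while s[j+1] == s[i]` is the takeWhile,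
-- the `for k in range(i, j+1)` fill is the replicate, and the outer while resumes at
-- j+1, i.e. on the dropWhile remainder.
def pvClassB : List Char → List Char
  | [] => []
  | a :: rest =>
    let k := (rest.takeWhile (· == a)).length
    let rest' := rest.dropWhile (· == a)
    let t := match rest' with
      | [] => 'S'
      | b :: _ => if a < b then 'S' else 'L'
    List.replicate (k + 1) t ++ pvClassB rest'
  termination_by l => l.length
  decreasing_by
    exact Nat.lt_succ_of_le (List.length_dropWhile_le _ _)

def classify_suffixes_alt (s : String) : String := String.mk (pvClassB s.toList)

-- ===== PRECONDITION & SPEC =====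
-- Pre_ excludes only the empty string, on which both A and B raise IndexError
-- (`types[-1] = 'S'` on an empty list).
def Pre_classify_suffixes (s : String) : Prop := s ≠ ""
instance (s : String) : Decidable (Pre_classify_suffixes s) := by unfold Pre_classify_suffixes; infer_instance

def pvWitness_classify_suffixes : String := "banana"

def Spec_classify_suffixes (s : String) (out : String) : Prop := out = classify_suffixes_alt s
instance (s : String) (out : String) : Decidable (Spec_classify_suffixes s out) := by unfold Spec_classify_suffixes; infer_instance

-- ===== CLAIM (what is proved, stated in full; the proofs are below) =====
def Claim_equal_classify_suffixes : Prop := ∀ (s : String), Dom_classify_suffixes s → Pre_classify_suffixes s → Spec_classify_suffixes s (classify_suffixes s)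

-- ===== LEMMAS AND PROOFS =====

-- the run type B assigns, as a function of the run character and the remainder
def pvRunT (a : Char) (rest' : List Char) : Char :=
  match rest' with
  | [] => 'S'
  | b :: _ => if a < b then 'S' else 'L'

-- A assigns pvRunT uniformly over a maximal run
theorem pvClassA_run (a : Char) (m : Nat) (rest' : List Char)
    (h : ∀ b r, rest' = b :: r → b ≠ a) :
    pvClassA (List.replicate (m + 1) a ++ rest')
      = List.replicate (m + 1) (pvRunT a rest') ++ pvClassA rest' := by
  induction m with
  | zero =>
    cases rest' with
    | nil => simp [pvClassA, pvRunT]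
    | cons b r =>
      have hba : b ≠ a := h b r rfl
      simp only [List.replicate, List.nil_append, List.cons_append]
      rcases lt_trichotomy a b with hlt | heq | hgt
      · have : ¬ b < a := not_lt_of_gt hlt
        simp [pvClassA, pvRunT, this, hlt]
      · exact absurd heq.symm hba
      · simp [pvClassA, pvRunT, hgt, not_lt_of_gt hgt]
  | succ m ih =>
    have hrepl : List.replicate (m + 1 + 1) a ++ rest'
        = a :: a :: (List.replicate m a ++ rest') := by
      simp [List.replicate_succ]
    have hne : a :: (List.replicate m a ++ rest')
        = List.replicate (m + 1) a ++ rest' := by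
      simp [List.replicate_succ]
    rw [hrepl]
    show (if a < a then 'L' else if a < a then 'S'
          else (pvClassA (a :: (List.replicate m a ++ rest'))).headD 'S')
        :: pvClassA (a :: (List.replicate m a ++ rest')) = _
    rw [hne, ih]
    simp [List.replicate_succ]

-- head of dropWhile fails the predicate
theorem pvDropWhileHead {α : Type} (p : α → Bool) (l : List α) (b : α) (r : List α)
    (h : l.dropWhile p = b :: r) : p b = false := by
  induction l with
  | nil => simp at h
  | cons x xs ih =>
    by_cases hx : p x = true
    · rw [List.dropWhile_cons_of_pos hx] at h
      exact ih h
    · rw [List.dropWhile_cons_of_neg hx] at h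
      cases h
      simpa using hx

theorem pvClassA_eq_pvClassB (l : List Char) : pvClassA l = pvClassB l := by
  induction hn : l.length using Nat.strong_induction_on generalizing l with
  | _ n ih =>
    cases l with
    | nil => simp [pvClassA, pvClassB]
    | cons a rest =>
      have htw : rest.takeWhile (· == a) = List.replicate (rest.takeWhile (· == a)).length a := by
        apply List.eq_replicate_of_mem
        intro b hb
        have := List.mem_takeWhile_imp hb
        exact eq_of_beq this
      have hsplit : a :: rest
          = List.replicate ((rest.takeWhile (· == a)).length + 1) a ++ rest.dropWhile (· == a) := by
        conv_lhs => rw [← List.takeWhile_append_dropWhile (p := (· == a)) (l := rest)]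
        rw [List.replicate_succ, List.cons_append]
        congr 1
        conv_lhs => rw [htw]
      have hhd : ∀ b r, rest.dropWhile (· == a) = b :: r → b ≠ a := by
        intro b r hbr heq
        have := pvDropWhileHead (· == a) rest b r hbr
        simp [heq] at this
      have hlen : (rest.dropWhile (· == a)).length < n := by
        have := List.length_dropWhile_le (· == a) rest
        subst hn; simp; omega
      have hih : pvClassA (rest.dropWhile (· == a)) = pvClassB (rest.dropWhile (· == a)) :=
        ih _ hlen _ rfl
      rw [hsplit, pvClassA_run a _ _ hhd, hih]
      conv_rhs => rw [← hsplit, pvClassB.eq_def]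
      simp only [pvRunT]

-- ===== VERDICT (by name: the statement is the Claim_ definition above) =====
theorem classify_suffixes_spec : Claim_equal_classify_suffixes := by
  intro s _ _
  unfold Spec_classify_suffixes classify_suffixes classify_suffixes_alt
  rw [pvClassA_eq_pvClassB]
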